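-- pv_equiv track=rewrite | github.com/Drat333/Basic-Genome-Alignment | nw.py | substringMatch
-- ===== SOURCE A (Python) =====
-- def substringMatch(seq1,seq2):
--     score=0
--     for i in range(len(seq1)-2):
--         subseq1=seq1[i:i+3]
--         for j in range(len(seq2)-2):
--             subseq2=seq2[j:j+3]
--             if (subseq1==subseq2):
--                 score+=1
--     return score
-- ===== SOURCE B (Python) =====
-- def substringMatch(seq1, seq2):
--     counts = {}
--     for j in range(len(seq2) - 2):
--         k = seq2[j:j+3]
--         counts[k] = counts.get(k, 0) + 1
--     score = 0
--     for i in range(len(seq1) - 2):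
--         score += counts.get(seq1[i:i+3], 0)
--     return score
-- ===== Notes on version B (the rewrite author's own statement) =====
-- stated objective: faster
-- what changed: Instead of comparing every 3-mer of seq1 against every 3-mer of seq2 (nested loops), B builds a frequency dictionary of seq2's 3-mers in one pass and sums lookups for seq1's 3-mers.
import Mathlib
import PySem

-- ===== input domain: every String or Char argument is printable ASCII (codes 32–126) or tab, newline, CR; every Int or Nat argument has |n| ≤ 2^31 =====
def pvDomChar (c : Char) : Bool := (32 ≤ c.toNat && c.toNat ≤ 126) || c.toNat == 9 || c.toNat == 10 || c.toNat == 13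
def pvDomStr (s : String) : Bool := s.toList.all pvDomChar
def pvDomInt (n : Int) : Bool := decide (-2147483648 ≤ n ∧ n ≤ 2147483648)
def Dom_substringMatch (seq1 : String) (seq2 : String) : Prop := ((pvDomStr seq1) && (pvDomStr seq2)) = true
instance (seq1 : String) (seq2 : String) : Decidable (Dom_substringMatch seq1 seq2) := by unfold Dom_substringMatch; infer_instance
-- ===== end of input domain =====

-- B replaces A's all-pairs 3-mer comparison with a one-pass frequency dictionary of seq2's
-- 3-mers plus one lookup pass over seq1's 3-mers (objective: faster, O(n*m) → O(n+m)).

-- ===== PORT A =====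
def substringMatch (seq1 : String) (seq2 : String) : Int :=
  let cs1 := seq1.toList
  let cs2 := seq2.toList
  (PySem.List.pyRange 0 ((cs1.length : Int) - 2) 1).foldl
    (fun score i =>
      let subseq1 := PySem.List.slice cs1 (some i) (some (i + 3))
      (PySem.List.pyRange 0 ((cs2.length : Int) - 2) 1).foldl
        (fun sc j =>
          let subseq2 := PySem.List.slice cs2 (some j) (some (j + 3))
          if subseq1 = subseq2 then sc + 1 else sc)
        score)
    0

-- ===== PORT B =====
-- counts[k] = counts.get(k, 0) + 1  is  Dict.modify k 0 (· + 1)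
def substringMatch_alt (seq1 : String) (seq2 : String) : Int :=
  let cs1 := seq1.toList
  let cs2 := seq2.toList
  let counts : PySem.Dict (List Char) Int :=
    (PySem.List.pyRange 0 ((cs2.length : Int) - 2) 1).foldl
      (fun d j => d.modify (PySem.List.slice cs2 (some j) (some (j + 3))) 0 (· + 1))
      PySem.Dict.empty
  (PySem.List.pyRange 0 ((cs1.length : Int) - 2) 1).foldl
    (fun score i => score + counts.getD (PySem.List.slice cs1 (some i) (some (i + 3))) 0)
    0

-- ===== PRECONDITION & SPEC =====
def Spec_substringMatch (seq1 : String) (seq2 : String) (out : Int) : Prop := out = substringMatch_alt seq1 seq2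
instance (seq1 : String) (seq2 : String) (out : Int) : Decidable (Spec_substringMatch seq1 seq2 out) := by unfold Spec_substringMatch; infer_instance

-- ===== CLAIM (what is proved, stated in full; the proofs are below) =====
def Claim_equal_substringMatch : Prop := ∀ (seq1 : String) (seq2 : String), Dom_substringMatch seq1 seq2 → Spec_substringMatch seq1 seq2 (substringMatch seq1 seq2)

-- ===== LEMMAS AND PROOFS =====

-- A's inner loop over seq2's positions counts the occurrences of one 3-mer of seq1
-- among seq2's 3-mers.
theorem pv_inner (cs2 : List Char) (sub : List Char) (s : Int) :
    (PySem.List.pyRange 0 ((cs2.length : Int) - 2) 1).foldl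
      (fun sc j =>
        if sub = PySem.List.slice cs2 (some j) (some (j + 3)) then sc + 1 else sc) s
    = s + (((PySem.List.pyRange 0 ((cs2.length : Int) - 2) 1).map
        (fun j => PySem.List.slice cs2 (some j) (some (j + 3)))).count sub : Int) := by
  rw [List.count, List.countP_map]
  simp only [Function.comp_def]
  rw [← PySem.List.foldl_count_if (fun j => PySem.List.slice cs2 (some j) (some (j + 3)) == sub)]
  apply PySem.List.foldl_congr_mem
  intro acc j _
  by_cases h : sub = PySem.List.slice cs2 (some j) (some (j + 3))
  · simp [h]
  · simp [beq_iff_eq, h, Ne.symm h]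

-- B's dictionary is the counter of seq2's 3-mer list.
theorem pv_counts (cs2 : List Char) :
    (PySem.List.pyRange 0 ((cs2.length : Int) - 2) 1).foldl
      (fun d j => d.modify (PySem.List.slice cs2 (some j) (some (j + 3))) 0 (· + 1))
      PySem.Dict.empty
    = PySem.Dict.counter ((PySem.List.pyRange 0 ((cs2.length : Int) - 2) 1).map
        (fun j => PySem.List.slice cs2 (some j) (some (j + 3)))) := by
  rw [PySem.Dict.counter, List.foldl_map]

-- ===== VERDICT (by name: the statement is the Claim_ definition above) =====
theorem substringMatch_spec : Claim_equal_substringMatch := by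
  intro seq1 seq2 _
  unfold Spec_substringMatch substringMatch substringMatch_alt
  dsimp only
  rw [pv_counts seq2.toList]
  apply PySem.List.foldl_congr_mem
  intro acc i _
  rw [pv_inner, PySem.Dict.getD_counter]
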